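-- pv_equiv track=rewrite | github.com/kurtbell87/cme-mbo-foundation-model | research/04-mbo-grammar/phase3_signal_check.py | generate_folds
-- ===== SOURCE A (Python) =====
-- from itertools import combinations
--
-- N_GROUPS = 6
--
-- N_TEST_GROUPS = 2
--
-- BUFFER_TOKENS = 30000  # purge + embargo zone near test boundaries
--
-- def generate_folds(n_tokens, n_groups=N_GROUPS, n_test_groups=N_TEST_GROUPS, buffer=BUFFER_TOKENS):
--     """Generate CPCV fold token ranges.
--
--     Returns list of (train_ranges, test_ranges) where each is a list of (start, end) tuples.
--     """
--     tpg = n_tokens // n_groups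
--     group_bounds = [(g * tpg, min((g + 1) * tpg, n_tokens)) for g in range(n_groups)]
--
--     folds = []
--     for test_groups in combinations(range(n_groups), n_test_groups):
--         test_set = set(test_groups)
--
--         test_ranges = [group_bounds[g] for g in test_groups]
--
--         train_ranges = []
--         for g in range(n_groups):
--             if g in test_set:
--                 continue
--             s, e = group_bounds[g]
--
--             # Trim edges adjacent to test groups (purge + embargo zone)
--             for tg in test_groups:
--                 ts, te = group_bounds[tg]
--                 if te == s:  # test group directly before this train group
--                     s = min(s + buffer, e)
--                 if ts == e:  # test group directly after this train group
--                     e = max(e - buffer, s)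
--
--             if s < e:
--                 train_ranges.append((s, e))
--
--         folds.append((train_ranges, test_ranges))
--
--     return folds
-- ===== SOURCE B (Python) =====
-- from itertools import combinations
--
--
-- def generate_folds(n_tokens, n_groups=6, n_test_groups=2, buffer=30000):
--     """Generate CPCV fold token ranges.
--
--     Returns list of (train_ranges, test_ranges) where each is a list of (start, end) tuples.
--     """
--     tpg = n_tokens // n_groups
--
--     def span(g):
--         return (g * tpg, min((g + 1) * tpg, n_tokens))
--
--     def trimmed(g, test_set):
--         # groups are contiguous, so a test group touches train group g exactly
--         # when its index is g-1 (before) or g+1 (after)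
--         s, e = span(g)
--         if g - 1 in test_set:
--             s = min(s + buffer, e)
--         if g + 1 in test_set:
--             e = max(e - buffer, s)
--         return (s, e) if s < e else None
--
--     def fold(test_groups):
--         test_set = set(test_groups)
--         trains = [r for r in (trimmed(g, test_set)
--                               for g in range(n_groups) if g not in test_set)
--                   if r is not None]
--         return (trains, [span(g) for g in test_groups])
--
--     return [fold(tg) for tg in combinations(range(n_groups), n_test_groups)]
-- ===== Notes on version B (the rewrite author's own statement) =====
-- stated objective: simpler
-- what changed: The inner per-train-group scan over all test groups (matching boundary values te==s / ts==e) is replaced by two direct index-adjacency membership tests on the contiguous layout, and the accumulator loops are replaced by a comprehension/map-filter decomposition (one fold() helper per combination, trains built by filtering trimmed spans, no group_bounds list).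
import Mathlib
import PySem

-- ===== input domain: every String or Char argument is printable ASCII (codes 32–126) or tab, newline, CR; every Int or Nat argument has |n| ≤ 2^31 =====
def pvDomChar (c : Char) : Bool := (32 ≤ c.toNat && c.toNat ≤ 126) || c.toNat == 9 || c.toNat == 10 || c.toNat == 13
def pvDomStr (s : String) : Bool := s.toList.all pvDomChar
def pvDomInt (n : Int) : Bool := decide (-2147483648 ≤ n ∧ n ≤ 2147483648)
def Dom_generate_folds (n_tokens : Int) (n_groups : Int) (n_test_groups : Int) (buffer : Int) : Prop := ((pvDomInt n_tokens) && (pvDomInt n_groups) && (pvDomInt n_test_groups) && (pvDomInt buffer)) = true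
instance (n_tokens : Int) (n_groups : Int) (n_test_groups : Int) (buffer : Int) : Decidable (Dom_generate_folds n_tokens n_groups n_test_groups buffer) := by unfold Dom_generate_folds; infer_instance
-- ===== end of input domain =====

-- B replaces A's inner scan over test_groups (matching boundary values) with two direct
-- index-adjacency checks, and builds each fold by map/filter comprehensions instead of
-- accumulator loops (simpler decomposition).

-- ===== PORT A =====
-- itertools.combinations(xs, r): PySem.List.combinations with CPython's early-exit when
-- fewer than r items remain (same algorithm and output; proved equal in pvCombos_eq below)
def pvCombos {α : Type} : List α → Nat → List (List α)
  | _, 0 => [[]]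
  | [], _ + 1 => []
  | x :: xs, r + 1 =>
      if xs.length < r then [] else (pvCombos xs r).map (x :: ·) ++ pvCombos xs (r + 1)

def generate_folds (n_tokens : Int) (n_groups : Int) (n_test_groups : Int) (buffer : Int) : List ((List (Int × Int)) × (List (Int × Int))) :=
  let tpg := PySem.Int.floordiv n_tokens n_groups
  let group_bounds := (PySem.List.pyRange 0 n_groups 1).map
    (fun g => (g * tpg, min ((g + 1) * tpg) n_tokens))
  (pvCombos (PySem.List.pyRange 0 n_groups 1) n_test_groups.toNat).foldl
    (fun folds test_groups =>
      let test_set := PySem.Set.ofList test_groups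
      -- group_bounds[g]: g is always in range here, so the pyGetD default is never used
      let test_ranges := test_groups.map (fun g => PySem.List.pyGetD group_bounds g (0, 0))
      let train_ranges := (PySem.List.pyRange 0 n_groups 1).foldl
        (fun acc g =>
          if PySem.Set.contains test_set g then acc
          else
            let se := PySem.List.pyGetD group_bounds g (0, 0)
            let se2 := test_groups.foldl
              (fun (se : Int × Int) tg =>
                let tse := PySem.List.pyGetD group_bounds tg (0, 0)
                let s := if tse.2 = se.1 then min (se.1 + buffer) se.2 else se.1
                let e := if tse.1 = se.2 then max (se.2 - buffer) s else se.2
                (s, e)) se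
            if se2.1 < se2.2 then acc ++ [se2] else acc) []
      folds ++ [(train_ranges, test_ranges)]) []

-- ===== PORT B =====
-- bounds of group g ('span' in Source B)
def gfSpan (n_tokens tpg : Int) (g : Int) : Int × Int :=
  (g * tpg, min ((g + 1) * tpg) n_tokens)

-- 'trimmed' in Source B: adjacency-trimmed train range of group g, none if empty
def gfTrimmed (n_tokens tpg buffer : Int) (test_set : PySem.Set Int) (g : Int) : Option (Int × Int) :=
  let se := gfSpan n_tokens tpg g
  let s := if PySem.Set.contains test_set (g - 1) then min (se.1 + buffer) se.2 else se.1
  let e := if PySem.Set.contains test_set (g + 1) then max (se.2 - buffer) s else se.2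
  if s < e then some (s, e) else none

-- 'fold' in Source B: one (train_ranges, test_ranges) pair for one combination
def gfFold (n_tokens tpg n_groups buffer : Int) (test_groups : List Int) : (List (Int × Int)) × (List (Int × Int)) :=
  let test_set := PySem.Set.ofList test_groups
  let trains := ((PySem.List.pyRange 0 n_groups 1).filter
      (fun g => !PySem.Set.contains test_set g)).filterMap
      (gfTrimmed n_tokens tpg buffer test_set)
  (trains, test_groups.map (gfSpan n_tokens tpg))

def generate_folds_alt (n_tokens : Int) (n_groups : Int) (n_test_groups : Int) (buffer : Int) : List ((List (Int × Int)) × (List (Int × Int))) :=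
  let tpg := PySem.Int.floordiv n_tokens n_groups
  (pvCombos (PySem.List.pyRange 0 n_groups 1) n_test_groups.toNat).map
    (gfFold n_tokens tpg n_groups buffer)

-- ===== PRECONDITION & SPEC =====
-- Pre_ excludes n_groups = 0 (A raises ZeroDivisionError) and n_test_groups < 0 (A raises
-- ValueError), and restricts to the natural domain of a nonnegative purge buffer: with
-- buffer < 0 and n_groups > 0, A's value-matching trim cascades across consecutive test
-- groups (a train range grows into the test groups), an artefact B does not reproduce.
def Pre_generate_folds (n_tokens : Int) (n_groups : Int) (n_test_groups : Int) (buffer : Int) : Prop :=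
  0 ≤ n_test_groups ∧ (n_groups < 0 ∨ (0 < n_groups ∧ 0 ≤ buffer))
instance (n_tokens : Int) (n_groups : Int) (n_test_groups : Int) (buffer : Int) : Decidable (Pre_generate_folds n_tokens n_groups n_test_groups buffer) := by unfold Pre_generate_folds; infer_instance

def pvWitness_generate_folds : Int × Int × Int × Int := (12, 4, 2, 1)

def Spec_generate_folds (n_tokens : Int) (n_groups : Int) (n_test_groups : Int) (buffer : Int) (out : List ((List (Int × Int)) × (List (Int × Int)))) : Prop := out = generate_folds_alt n_tokens n_groups n_test_groups buffer
instance (n_tokens : Int) (n_groups : Int) (n_test_groups : Int) (buffer : Int) (out : List ((List (Int × Int)) × (List (Int × Int)))) : Decidable (Spec_generate_folds n_tokens n_groups n_test_groups buffer out) := by unfold Spec_generate_folds; infer_instance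

-- ===== CLAIM (what is proved, stated in full; the proofs are below) =====
def Claim_equal_generate_folds : Prop := ∀ (n_tokens : Int) (n_groups : Int) (n_test_groups : Int) (buffer : Int), Dom_generate_folds n_tokens n_groups n_test_groups buffer → Pre_generate_folds n_tokens n_groups n_test_groups buffer → Spec_generate_folds n_tokens n_groups n_test_groups buffer (generate_folds n_tokens n_groups n_test_groups buffer)

-- ===== LEMMAS AND PROOFS =====

-- the pruned combinations helper is itertools.combinations
theorem pvCombos_eq {α : Type} (xs : List α) (r : Nat) :
    pvCombos xs r = PySem.List.combinations xs r := by
  induction xs generalizing r with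
  | nil =>
      cases r with
      | zero => simp [pvCombos, PySem.List.combinations_zero]
      | succ r => simp [pvCombos, PySem.List.combinations_nil_succ]
  | cons x xs ih =>
      cases r with
      | zero => simp [pvCombos, PySem.List.combinations_zero]
      | succ r =>
          rw [PySem.List.combinations_cons_succ, pvCombos, ih, ih]
          by_cases h : xs.length < r
          · rw [if_pos h, PySem.List.combinations_eq_nil_of_length_lt xs h,
              PySem.List.combinations_eq_nil_of_length_lt xs
                (by omega : xs.length < r + 1)]
            simp
          · rw [if_neg h]

-- A's inner trim step, with the value of group_bounds[tg] written out arithmetically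
def trimStep (tpg buffer n_tokens : Int) (se : Int × Int) (tg : Int) : Int × Int :=
  let s := if min ((tg + 1) * tpg) n_tokens = se.1 then min (se.1 + buffer) se.2 else se.1
  let e := if tg * tpg = se.2 then max (se.2 - buffer) s else se.2
  (s, e)

theorem foldl_id {α β : Type} (f : β → α → β) (l : List α) (b : β)
    (h : ∀ x ∈ l, f b x = b) : l.foldl f b = b := by
  induction l with
  | nil => rfl
  | cons x t ih =>
      simp only [List.foldl_cons, h x (by simp)]
      exact ih (fun y hy => h y (by simp [hy]))

-- an accumulator loop 'if h(x) is some y: acc.append(y)' is a filterMap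
theorem foldl_append_opt {α β : Type} (h : α → Option β) (l : List α) (a : List β) :
    l.foldl (fun acc x => match h x with | some y => acc ++ [y] | none => acc) a
      = a ++ l.filterMap h := by
  induction l generalizing a with
  | nil => simp
  | cons x t ih =>
      simp only [List.foldl_cons, List.filterMap_cons]
      cases hx : h x <;> simp [hx, ih]

-- a filterMap over a filtered list, fused
theorem filterMap_filter {α β : Type} (p : α → Bool) (h : α → Option β) (l : List α) :
    (l.filter p).filterMap h = l.filterMap (fun x => if p x then h x else none) := by
  induction l with
  | nil => rfl
  | cons x t ih =>
      by_cases hp : p x = true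
      · simp [List.filter_cons, List.filterMap_cons, hp, ih]
      · simp only [Bool.not_eq_true] at hp
        simp [List.filter_cons, List.filterMap_cons, hp, ih]

theorem trimStep_id (tpg buffer n_tokens : Int) (se : Int × Int) (x : Int)
    (h1 : min ((x + 1) * tpg) n_tokens ≠ se.1) (h2 : x * tpg ≠ se.2) :
    trimStep tpg buffer n_tokens se x = se := by
  simp [trimStep, h1, h2]

theorem mul_mono_lt (a b t : Int) (ht : 1 ≤ t) (h : a < b) : a * t < b * t :=
  mul_lt_mul_of_pos_right h (by omega)

-- an inverted interval stays inverted: the trim fold never makes snd exceed fst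
theorem trim_fold_snd_le (tpg B NT : Int) (hB : 0 ≤ B) :
    ∀ (c : List Int) (se : Int × Int), se.2 ≤ se.1 →
    (c.foldl (trimStep tpg B NT) se).2 ≤ (c.foldl (trimStep tpg B NT) se).1 := by
  intro c
  induction c with
  | nil => intro se h; exact h
  | cons x t ih =>
      intro se h
      simp only [List.foldl_cons]
      apply ih
      simp only [trimStep]
      split_ifs <;> (try simp) <;> omega

-- the trim fold over the part of a combination beyond g-1 (s already trimmed or not)
theorem trim_fold_tail (tpg B NT n g : Int) (h1 : 1 ≤ tpg) (hB : 0 ≤ B) (hNT : n * tpg ≤ NT)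
    (hg : 0 ≤ g) (hgn : g < n) :
    ∀ (c : List Int), c.Pairwise (· < ·) → (∀ x ∈ c, 0 ≤ x ∧ x < n ∧ x ≠ g ∧ x ≠ g - 1) →
    ∀ s : Int, g * tpg ≤ s → s ≤ (g + 1) * tpg →
    c.foldl (trimStep tpg B NT) (s, (g + 1) * tpg)
      = (s, if g + 1 ∈ c then max ((g + 1) * tpg - B) s else (g + 1) * tpg) := by
  intro c
  induction c with
  | nil => intro _ _ s _ _; simp
  | cons x t ih =>
      intro hpw hm s hs1 hs2
      obtain ⟨hx0, hxn, hxg, hxg1⟩ := hm x (by simp)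
      have hpw' := (List.pairwise_cons.mp hpw).2
      have hgt := (List.pairwise_cons.mp hpw).1
      have hmlx : (x + 1) * tpg ≤ n * tpg :=
        mul_le_mul_of_nonneg_right (by omega) (by omega)
      simp only [List.foldl_cons]
      by_cases hxp : x = g + 1
      · subst hxp
        have hstep : trimStep tpg B NT (s, (g + 1) * tpg) (g + 1)
            = (s, max ((g + 1) * tpg - B) s) := by
          have m2 : (g + 1) * tpg < (g + 1 + 1) * tpg := mul_mono_lt _ _ _ h1 (by omega)
          have hc1 : min ((g + 1 + 1) * tpg) NT ≠ s := by omega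
          simp only [trimStep, if_neg hc1]
          simp
        rw [hstep, foldl_id]
        · simp
        · intro y hy
          obtain ⟨hy0, hyn, hyg, hyg1⟩ := hm y (by simp [hy])
          have hygt : g + 1 < y := hgt y hy
          have m1 : (y + 1) * tpg ≤ n * tpg :=
            mul_le_mul_of_nonneg_right (by omega) (by omega)
          have m2 : (g + 1) * tpg < (y + 1) * tpg := mul_mono_lt _ _ _ h1 (by omega)
          have m3 : (g + 1) * tpg < y * tpg := mul_mono_lt _ _ _ h1 (by omega)
          exact trimStep_id _ _ _ _ _ (by simp only []; omega) (by simp only []; omega)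
      · have hstep : trimStep tpg B NT (s, (g + 1) * tpg) x = (s, (g + 1) * tpg) := by
          have hxcase : x + 1 < g ∨ g + 2 ≤ x := by
            rcases lt_trichotomy x g with h' | h' | h'
            · left; omega
            · exact absurd h' hxg
            · right; omega
          apply trimStep_id
          · rcases hxcase with hlt | hge
            · have m2 : (x + 1) * tpg < g * tpg := mul_mono_lt _ _ _ h1 (by omega)
              simp only []; omega
            · have m2 : (g + 1) * tpg < (x + 1) * tpg := mul_mono_lt _ _ _ h1 (by omega)
              simp only []; omega
          · rcases hxcase with hlt | hge
            · have m3 : x * tpg < (g + 1) * tpg := mul_mono_lt _ _ _ h1 (by omega)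
              simp only []; omega
            · have m3 : (g + 1) * tpg < x * tpg := mul_mono_lt _ _ _ h1 (by omega)
              simp only []; omega
        rw [hstep, ih hpw' (fun y hy => hm y (by simp [hy])) s hs1 hs2]
        have hxne : ¬ ((g + 1 : Int) = x) := fun h => hxp h.symm
        simp [List.mem_cons, hxne]

-- the whole inner trim fold, tpg ≥ 1: exactly the two index-adjacent test groups trim
theorem trim_fold_pos (tpg B NT n g : Int) (h1 : 1 ≤ tpg) (hB : 0 ≤ B) (hNT : n * tpg ≤ NT)
    (hg : 0 ≤ g) (hgn : g < n) :
    ∀ (c : List Int), c.Pairwise (· < ·) → (∀ x ∈ c, 0 ≤ x ∧ x < n ∧ x ≠ g) →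
    c.foldl (trimStep tpg B NT) (g * tpg, (g + 1) * tpg)
      = ((if g - 1 ∈ c then min (g * tpg + B) ((g + 1) * tpg) else g * tpg),
         (if g + 1 ∈ c then max ((g + 1) * tpg - B)
              (if g - 1 ∈ c then min (g * tpg + B) ((g + 1) * tpg) else g * tpg)
            else (g + 1) * tpg)) := by
  have hexp : (g + 1) * tpg = g * tpg + tpg := by ring
  have hmg : g * tpg ≤ n * tpg := mul_le_mul_of_nonneg_right (by omega) (by omega)
  intro c
  induction c with
  | nil => intro _ _; simp
  | cons x t ih =>
      intro hpw hm
      obtain ⟨hx0, hxn, hxg⟩ := hm x (by simp)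
      have hpw' := (List.pairwise_cons.mp hpw).2
      have hgt := (List.pairwise_cons.mp hpw).1
      have hmlx : (x + 1) * tpg ≤ n * tpg :=
        mul_le_mul_of_nonneg_right (by omega) (by omega)
      simp only [List.foldl_cons]
      by_cases hxm : x = g - 1
      · subst hxm
        have hg1 : ((g : Int) - 1 + 1) * tpg = g * tpg := by ring
        have hstep : trimStep tpg B NT (g * tpg, (g + 1) * tpg) (g - 1)
            = (min (g * tpg + B) ((g + 1) * tpg), (g + 1) * tpg) := by
          have hc1 : min ((g - 1 + 1) * tpg) NT = g * tpg := by rw [hg1]; omega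
          have m3 : (g - 1) * tpg < (g + 1) * tpg := mul_mono_lt _ _ _ h1 (by omega)
          have hc2 : (g - 1) * tpg ≠ (g + 1) * tpg := by omega
          simp only [trimStep, hc1, if_neg hc2]
          simp
        rw [hstep]
        rw [trim_fold_tail tpg B NT n g h1 hB hNT hg hgn t hpw'
            (fun y hy => ⟨(hm y (by simp [hy])).1, (hm y (by simp [hy])).2.1,
              (hm y (by simp [hy])).2.2, by have := hgt y hy; omega⟩)
            (min (g * tpg + B) ((g + 1) * tpg)) (by omega) (by omega)]
        have hm1 : ((g : Int) - 1) ∈ (g - 1) :: t := by simp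
        have hp1 : (((g : Int) + 1) ∈ (g - 1) :: t) ↔ ((g + 1 : Int) ∈ t) := by
          simp only [List.mem_cons]
          constructor
          · intro h; rcases h with h | h
            · omega
            · exact h
          · exact fun h => Or.inr h
        by_cases hin : ((g : Int) + 1) ∈ t
        · simp [hm1, hp1, hin]
        · simp [hm1, hp1, hin]
      · by_cases hxp : x = g + 1
        · subst hxp
          have hnm : ((g : Int) - 1) ∉ (g + 1) :: t := by
            intro h
            rcases List.mem_cons.mp h with h | h
            · omega
            · have := hgt _ h; omega
          have hstep : trimStep tpg B NT (g * tpg, (g + 1) * tpg) (g + 1)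
              = (g * tpg, max ((g + 1) * tpg - B) (g * tpg)) := by
            have m2 : (g + 1) * tpg < (g + 1 + 1) * tpg := mul_mono_lt _ _ _ h1 (by omega)
            have hc1 : min ((g + 1 + 1) * tpg) NT ≠ g * tpg := by omega
            simp only [trimStep, if_neg hc1]
            simp
          rw [hstep, foldl_id]
          · have hself : ((g : Int) + 1) ∈ (g + 1) :: t := by simp
            simp [hnm, hself]
          · intro y hy
            obtain ⟨hy0, hyn, hyg⟩ := hm y (by simp [hy])
            have hygt : g + 1 < y := hgt y hy
            have m1 : (y + 1) * tpg ≤ n * tpg :=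
              mul_le_mul_of_nonneg_right (by omega) (by omega)
            have m2 : (g + 1) * tpg < (y + 1) * tpg := mul_mono_lt _ _ _ h1 (by omega)
            have m3 : (g + 1) * tpg < y * tpg := mul_mono_lt _ _ _ h1 (by omega)
            exact trimStep_id _ _ _ _ _ (by simp only []; omega) (by simp only []; omega)
        · have hstep : trimStep tpg B NT (g * tpg, (g + 1) * tpg) x
              = (g * tpg, (g + 1) * tpg) := by
            have hxcase : x + 1 < g ∨ g + 2 ≤ x := by
              rcases lt_trichotomy x g with h' | h' | h'
              · left; omega
              · exact absurd h' hxg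
              · rcases lt_trichotomy x (g + 1) with h3 | h3 | h3
                · omega
                · exact absurd h3 hxp
                · right; omega
            apply trimStep_id
            · rcases hxcase with hlt | hge
              · have m2 : (x + 1) * tpg < g * tpg := mul_mono_lt _ _ _ h1 (by omega)
                simp only []; omega
              · have m2 : (g + 1) * tpg < (x + 1) * tpg := mul_mono_lt _ _ _ h1 (by omega)
                simp only []; omega
            · rcases hxcase with hlt | hge
              · have m3 : x * tpg < (g + 1) * tpg := mul_mono_lt _ _ _ h1 (by omega)
                simp only []; omega
              · have m3 : (g + 1) * tpg < x * tpg := mul_mono_lt _ _ _ h1 (by omega)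
                simp only []; omega
          rw [hstep, ih hpw' (fun y hy => hm y (by simp [hy]))]
          have e1 : ¬ ((g - 1 : Int) = x) := fun h => hxm h.symm
          have e2 : ¬ ((g + 1 : Int) = x) := fun h => hxp h.symm
          simp [List.mem_cons, e1, e2]

-- A's trimmed-and-guarded train range of group g equals B's gfTrimmed (as an option)
theorem train_entry_eq (NT n B g tpg : Int) (htpg : tpg = PySem.Int.floordiv NT n)
    (hn : 0 < n) (hB : 0 ≤ B) (hg : 0 ≤ g) (hgn : g < n)
    (c : List Int) (hpw : c.Pairwise (· < ·)) (hmem : ∀ x ∈ c, 0 ≤ x ∧ x < n) (hgc : g ∉ c) :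
    (let se2 := c.foldl (trimStep tpg B NT) (g * tpg, min ((g + 1) * tpg) NT)
     if se2.1 < se2.2 then some se2 else none)
    = gfTrimmed NT tpg B (PySem.Set.ofList c) g := by
  have hmemg : ∀ x ∈ c, 0 ≤ x ∧ x < n ∧ x ≠ g := fun x hx =>
    ⟨(hmem x hx).1, (hmem x hx).2, by intro h; exact hgc (h ▸ hx)⟩
  have hediv : tpg = NT / n := by rw [htpg]; exact PySem.Int.floordiv_eq_ediv_of_pos hn
  have hNT : n * tpg ≤ NT := by
    have h := Int.emod_nonneg NT (by omega : n ≠ 0)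
    rw [Int.emod_def] at h
    rw [hediv]
    linarith
  unfold gfTrimmed gfSpan
  simp only [PySem.Set.contains_iff, PySem.Set.mem_ofList]
  rcases lt_trichotomy tpg 0 with ht | ht | ht
  · -- tpg ≤ -1 : every group interval is inverted; both sides are none
    have hexp : (g + 1) * tpg = g * tpg + tpg := by ring
    have hE : min ((g + 1) * tpg) NT < g * tpg := by omega
    have hA := trim_fold_snd_le tpg B NT hB c (g * tpg, min ((g + 1) * tpg) NT)
      (by simp only []; omega)
    rw [if_neg (not_lt.mpr hA), if_neg (by split_ifs <;> omega)]
  · -- tpg = 0 : every group interval is (0, 0); both sides are none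
    subst ht
    have hNT0 : 0 ≤ NT := by omega
    simp only [mul_zero, zero_add, min_eq_left hNT0]
    rw [foldl_id]
    · rw [if_neg (by simp), if_neg (by split_ifs <;> omega)]
    · intro x hx
      simp only [trimStep, mul_zero, min_eq_left hNT0, if_pos rfl, Prod.mk.injEq]
      constructor <;> omega
  · -- tpg ≥ 1 : only the index-adjacent test groups trim
    have h1 : 1 ≤ tpg := ht
    have hgm : (g + 1) * tpg ≤ n * tpg :=
      mul_le_mul_of_nonneg_right (by omega) (by omega)
    have hmin : min ((g + 1) * tpg) NT = (g + 1) * tpg := by omega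
    simp only [hmin]
    rw [trim_fold_pos tpg B NT n g h1 hB hNT hg hgn c hpw hmemg]

-- ===== VERDICT (by name: the statement is the Claim_ definition above) =====
theorem generate_folds_spec : Claim_equal_generate_folds := by
  intro NT n ntg B _hDom hPre
  obtain ⟨_hntg, hpre⟩ := hPre
  unfold Spec_generate_folds generate_folds generate_folds_alt
  simp only [pvCombos_eq]
  rw [PySem.List.foldl_append_singleton_eq_map, List.nil_append]
  apply List.map_congr_left
  intro c hcm
  have hc : c.Sublist (PySem.List.pyRange 0 n 1) := PySem.List.sublist_of_mem_combinations hcm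
  have hmem : ∀ x ∈ c, 0 ≤ x ∧ x < n := by
    intro x hx
    have := hc.subset hx
    rwa [PySem.List.mem_pyRange_one] at this
  have hpw : c.Pairwise (· < ·) :=
    (PySem.List.pairwise_lt_pyRange_one 0 n).sublist hc
  unfold gfFold
  simp only []
  have htest : c.map (fun g => PySem.List.pyGetD
        ((PySem.List.pyRange 0 n 1).map (fun g => (g * PySem.Int.floordiv NT n,
          min ((g + 1) * PySem.Int.floordiv NT n) NT))) g (0, 0))
      = c.map (gfSpan NT (PySem.Int.floordiv NT n)) := by
    apply List.map_congr_left
    intro g hg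
    exact PySem.List.pyGetD_map_pyRange_of_nonneg _ _ _ _ (hmem g hg).1 (hmem g hg).2
  rw [htest]
  refine Prod.ext ?_ rfl
  simp only []
  -- the accumulator loop as a filterMap
  have hstep : (PySem.List.pyRange 0 n 1).foldl
      (fun acc g =>
        if PySem.Set.contains (PySem.Set.ofList c) g then acc
        else
          let se := PySem.List.pyGetD
            ((PySem.List.pyRange 0 n 1).map (fun g => (g * PySem.Int.floordiv NT n,
              min ((g + 1) * PySem.Int.floordiv NT n) NT))) g (0, 0)
          let se2 := c.foldl
            (fun (se : Int × Int) tg =>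
              let tse := PySem.List.pyGetD
                ((PySem.List.pyRange 0 n 1).map (fun g => (g * PySem.Int.floordiv NT n,
                  min ((g + 1) * PySem.Int.floordiv NT n) NT))) tg (0, 0)
              let s := if tse.2 = se.1 then min (se.1 + B) se.2 else se.1
              let e := if tse.1 = se.2 then max (se.2 - B) s else se.2
              (s, e)) se
          if se2.1 < se2.2 then acc ++ [se2] else acc) []
      = (PySem.List.pyRange 0 n 1).filterMap
        (fun g => if PySem.Set.contains (PySem.Set.ofList c) g then none
          else gfTrimmed NT (PySem.Int.floordiv NT n) B (PySem.Set.ofList c) g) := by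
    rw [show ((PySem.List.pyRange 0 n 1).filterMap
        (fun g => if PySem.Set.contains (PySem.Set.ofList c) g then none
          else gfTrimmed NT (PySem.Int.floordiv NT n) B (PySem.Set.ofList c) g))
      = [] ++ (PySem.List.pyRange 0 n 1).filterMap
        (fun g => if PySem.Set.contains (PySem.Set.ofList c) g then none
          else gfTrimmed NT (PySem.Int.floordiv NT n) B (PySem.Set.ofList c) g) from rfl,
      ← foldl_append_opt]
    apply PySem.List.foldl_congr_mem
    intro acc g hgr
    have hgb := (PySem.List.mem_pyRange_one).mp hgr
    have hn : 0 < n := by omega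
    have hB : 0 ≤ B := by
      rcases hpre with h | h
      · omega
      · exact h.2
    by_cases hgc : g ∈ c
    · rw [if_pos ((PySem.Set.contains_iff _ _).mpr ((PySem.Set.mem_ofList c g).mpr hgc))]
      simp [hgc]
    · have hnc : ¬ PySem.Set.contains (PySem.Set.ofList c) g = true := by
        intro h
        exact hgc ((PySem.Set.mem_ofList c g).mp ((PySem.Set.contains_iff _ _).mp h))
      rw [if_neg hnc]
      simp only [if_neg hnc]
      rw [PySem.List.pyGetD_map_pyRange_of_nonneg _ _ _ _ hgb.1 hgb.2]
      have hinner : c.foldl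
          (fun (se : Int × Int) tg =>
            let tse := PySem.List.pyGetD
              ((PySem.List.pyRange 0 n 1).map (fun g => (g * PySem.Int.floordiv NT n,
                min ((g + 1) * PySem.Int.floordiv NT n) NT))) tg (0, 0)
            let s := if tse.2 = se.1 then min (se.1 + B) se.2 else se.1
            let e := if tse.1 = se.2 then max (se.2 - B) s else se.2
            (s, e))
          (g * PySem.Int.floordiv NT n, min ((g + 1) * PySem.Int.floordiv NT n) NT)
          = c.foldl (trimStep (PySem.Int.floordiv NT n) B NT)
          (g * PySem.Int.floordiv NT n, min ((g + 1) * PySem.Int.floordiv NT n) NT) := by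
        apply PySem.List.foldl_congr_mem
        intro se tg htg
        rw [PySem.List.pyGetD_map_pyRange_of_nonneg _ _ _ _ (hmem tg htg).1 (hmem tg htg).2]
        rfl
      rw [hinner]
      have hent := train_entry_eq NT n B g (PySem.Int.floordiv NT n) rfl hn hB hgb.1 hgb.2
        c hpw hmem hgc
      simp only [] at hent
      rw [← hent]
      by_cases hlt : (c.foldl (trimStep (PySem.Int.floordiv NT n) B NT)
          (g * PySem.Int.floordiv NT n, min ((g + 1) * PySem.Int.floordiv NT n) NT)).1
          < (c.foldl (trimStep (PySem.Int.floordiv NT n) B NT)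
          (g * PySem.Int.floordiv NT n, min ((g + 1) * PySem.Int.floordiv NT n) NT)).2
      · simp [hlt]
      · simp [hlt]
  rw [hstep, filterMap_filter]
  apply List.filterMap_congr
  intro g _
  by_cases hg : PySem.Set.contains (PySem.Set.ofList c) g = true <;> simp [hg]
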